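-- pv_equiv track=rewrite | github.com/eappleton/cellarchitect | circuit_design/Verification.py | get_possible_activated_sites
-- ===== SOURCE A (Python) =====
-- def get_possible_activated_sites(sequence, indices_promoters, indices_terminators, direction, verbose):
--     '''find all possible sites that could be activated. ie sites between a promoter and a terminator'''
--     # strategy: we look for the first promoter in the list,
--     # and find where is the closest terminator on its right
--     # return: a list of bool corresponding to the sequence.
--     # true if it can be activated, false otherwise.
--
--     activated_list = [False]*len(sequence)
--     if direction is 'U':
--         for idx_promoter in indices_promoters:
--             try:
--                 idx_terminator = min(filter(lambda x: x > idx_promoter,indices_terminators))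
--                 # +1 and -1 in next line because we don't care about the promoter,
--                 # we're interested in what is in between the promoter and the terminator
--                 activated_list[idx_promoter+1:idx_terminator] = [True]*(idx_terminator-idx_promoter-1)
--             except:
--                 activated_list[idx_promoter+1:] = [True]*len(activated_list[idx_promoter+1:])
--
--     elif direction is 'D':
--          for idx_promoter in indices_promoters:
--             try:
--                 idx_terminator = min(filter(lambda x: x > idx_promoter,indices_terminators))
--                 # +1 and -1 in next line because we don't care about the promoter,
--                 # we're interested in what is in between the promoter and the terminator
--                 activated_list[idx_promoter+1:idx_terminator] = [True]*(idx_terminator-idx_promoter-1)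
--             except:
--                 activated_list[idx_promoter+1:] = [True]*len(activated_list[idx_promoter+1:])
--
--     return activated_list
-- ===== SOURCE B (Python) =====
-- def _first_greater(terms, x):
--     """Index of the first element of sorted list terms that is > x (bisect_right)."""
--     lo, hi = 0, len(terms)
--     while lo < hi:
--         mid = (lo + hi) // 2
--         if terms[mid] <= x:
--             lo = mid + 1
--         else:
--             hi = mid
--     return lo
--
--
-- def get_possible_activated_sites(sequence, indices_promoters, indices_terminators, direction, verbose):
--     '''Mark every position strictly between a promoter and its next terminator;
--     when nothing usable follows the promoter, mark everything to the end.'''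
--     activated = [False] * len(sequence)
--     if direction == 'U' or direction == 'D':
--         terms = sorted(indices_terminators)
--         for p in indices_promoters:
--             try:
--                 t = terms[_first_greater(terms, p)]
--                 activated[p + 1:t] = [True] * (t - p - 1)
--             except:
--                 activated[p + 1:] = [True] * len(activated[p + 1:])
--     return activated
-- ===== Notes on version B (the rewrite author's own statement) =====
-- stated objective: alternative
-- what changed: B sorts the terminators once and finds each promoter's next terminator with a hand-written binary search instead of A's per-promoter linear min(filter(...)) scan; the no-terminator-follows case is the indexing raising IndexError instead of min() raising ValueError. The per-promoter slice assignment dominates both, so overall cost is similar.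
import Mathlib
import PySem

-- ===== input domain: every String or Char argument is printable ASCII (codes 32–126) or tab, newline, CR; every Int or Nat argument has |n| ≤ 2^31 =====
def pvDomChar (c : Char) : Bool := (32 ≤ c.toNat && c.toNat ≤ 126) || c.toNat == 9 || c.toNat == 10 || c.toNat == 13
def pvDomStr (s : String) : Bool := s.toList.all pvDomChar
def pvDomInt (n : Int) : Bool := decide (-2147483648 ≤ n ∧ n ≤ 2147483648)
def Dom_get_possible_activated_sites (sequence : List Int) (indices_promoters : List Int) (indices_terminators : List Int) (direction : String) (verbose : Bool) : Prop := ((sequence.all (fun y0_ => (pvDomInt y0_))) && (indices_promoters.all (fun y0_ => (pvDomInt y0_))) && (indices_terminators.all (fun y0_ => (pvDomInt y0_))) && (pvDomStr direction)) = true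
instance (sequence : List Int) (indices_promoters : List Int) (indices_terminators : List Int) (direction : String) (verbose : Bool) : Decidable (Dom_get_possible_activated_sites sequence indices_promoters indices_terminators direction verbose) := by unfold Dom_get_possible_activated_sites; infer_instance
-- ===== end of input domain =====

-- B sorts the terminators once and finds each promoter's next terminator by binary search,
-- replacing A's per-promoter linear min(filter(...)) scan.
-- A's `direction is 'U'` / `is 'D'` checks are equality here: 1-character ASCII strings
-- are interned in CPython, and no other string is identical to 'U' or 'D'.

-- shared Python-semantics helper: CPython slice assignment  L[a0:b0] = R  (resolve both
-- bounds by the same clamping rule as read-slices, then stop := max start stop; exact per CPython)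
def pySetSlice (L : List Bool) (a0 b0 : Int) (R : List Bool) : List Bool :=
  let a := PySem.List.clampIdx L.length a0
  let b := max a (PySem.List.clampIdx L.length b0)
  L.take a ++ R ++ L.drop b

-- ===== PORT A =====
-- one iteration of A's for-loop body (identical in the 'U' and 'D' branches)
def stepA (indices_terminators : List Int) (L : List Bool) (p : Int) : List Bool :=
  match PySem.List.min? (indices_terminators.filter (fun x => decide (x > p))) (fun x => x) with
  | some t =>
      -- activated_list[p+1:t] = [True]*(t-p-1)
      pySetSlice L (p + 1) t (PySem.List.pyRepeat [true] (t - p - 1))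
  | none =>
      -- except: activated_list[p+1:] = [True]*len(activated_list[p+1:])
      let a := PySem.List.clampIdx L.length (p + 1)
      L.take a ++ PySem.List.pyRepeat [true] ((PySem.List.slice L (some (p + 1)) none).length : Int)

def get_possible_activated_sites (sequence : List Int) (indices_promoters : List Int) (indices_terminators : List Int) (direction : String) (verbose : Bool) : List Bool :=
  let activated_list := List.replicate sequence.length false
  if direction == "U" then
    indices_promoters.foldl (stepA indices_terminators) activated_list
  else if direction == "D" then
    indices_promoters.foldl (stepA indices_terminators) activated_list
  else
    activated_list

-- ===== PORT B =====
-- Source B's hand-written while-loop binary search (terms[mid] is always in range when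
-- lo < hi ≤ len terms, which every call maintains, so getD is exact there)
def bisectLoop (a : List Int) (x : Int) (lo hi : Nat) : Nat :=
  if h : lo < hi then
    let mid := (lo + hi) / 2
    if a.getD mid 0 ≤ x then bisectLoop a x (mid + 1) hi else bisectLoop a x lo mid
  else lo
termination_by hi - lo
decreasing_by all_goals omega

-- one iteration of Source B's for-loop body: try: t = terms[bisect]; slice-assign
-- except (IndexError when no terminator follows p): fill the tail
def stepB (terms : List Int) (L : List Bool) (p : Int) : List Bool :=
  let i := bisectLoop terms p 0 terms.length
  if i < terms.length then
    let t := terms.getD i 0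
    -- activated[p+1:t] = [True]*(t-p-1)
    pySetSlice L (p + 1) t (PySem.List.pyRepeat [true] (t - p - 1))
  else
    -- except: activated[p+1:] = [True]*len(activated[p+1:])
    let a := PySem.List.clampIdx L.length (p + 1)
    L.take a ++ PySem.List.pyRepeat [true] ((PySem.List.slice L (some (p + 1)) none).length : Int)

def get_possible_activated_sites_alt (sequence : List Int) (indices_promoters : List Int) (indices_terminators : List Int) (direction : String) (verbose : Bool) : List Bool :=
  let activated := List.replicate sequence.length false
  if direction == "U" || direction == "D" then
    let terms := PySem.List.sorted indices_terminators (fun x => x)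
    indices_promoters.foldl (stepB terms) activated
  else activated

-- ===== PRECONDITION & SPEC =====
def Spec_get_possible_activated_sites (sequence : List Int) (indices_promoters : List Int) (indices_terminators : List Int) (direction : String) (verbose : Bool) (out : List Bool) : Prop := out = get_possible_activated_sites_alt sequence indices_promoters indices_terminators direction verbose
instance (sequence : List Int) (indices_promoters : List Int) (indices_terminators : List Int) (direction : String) (verbose : Bool) (out : List Bool) : Decidable (Spec_get_possible_activated_sites sequence indices_promoters indices_terminators direction verbose out) := by unfold Spec_get_possible_activated_sites; infer_instance

-- ===== CLAIM (what is proved, stated in full; the proofs are below) =====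
def Claim_equal_get_possible_activated_sites : Prop := ∀ (sequence : List Int) (indices_promoters : List Int) (indices_terminators : List Int) (direction : String) (verbose : Bool), Dom_get_possible_activated_sites sequence indices_promoters indices_terminators direction verbose → Spec_get_possible_activated_sites sequence indices_promoters indices_terminators direction verbose (get_possible_activated_sites sequence indices_promoters indices_terminators direction verbose)

-- ===== LEMMAS AND PROOFS =====

-- the binary-search loop computes the bisect_right index on a ≤-sorted list
theorem bisectLoop_spec (a : List Int) (x : Int) (hs : a.Pairwise (· ≤ ·)) :
    ∀ (k lo hi : Nat), hi - lo = k → hi ≤ a.length → lo ≤ hi →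
      (∀ j (hj : j < a.length), j < lo → a[j] ≤ x) →
      (∀ j (hj : j < a.length), hi ≤ j → x < a[j]) →
      (∀ j (hj : j < a.length), j < bisectLoop a x lo hi → a[j] ≤ x) ∧
      (∀ j (hj : j < a.length), bisectLoop a x lo hi ≤ j → x < a[j]) := by
  intro k
  induction k using Nat.strong_induction_on with
  | _ k ih =>
    intro lo hi hk hhi hle hlow hhigh
    rw [bisectLoop]
    by_cases h : lo < hi
    · simp only [h, dif_pos]
      have hmid : (lo + hi) / 2 < a.length := by omega
      rw [List.getD_eq_getElem a 0 hmid]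
      by_cases hc : a[(lo + hi) / 2] ≤ x
      · simp only [hc, if_pos]
        refine ih (hi - ((lo + hi) / 2 + 1)) (by omega) _ _ rfl hhi (by omega) ?_ hhigh
        intro j hj hjlt
        rcases Nat.lt_or_ge j ((lo + hi) / 2) with hj2 | hj2
        · exact le_trans (List.pairwise_iff_getElem.1 hs j _ hj hmid hj2) hc
        · have : j = (lo + hi) / 2 := by omega
          subst this; exact hc
      · simp only [hc, if_neg, not_false_iff]
        rw [not_le] at hc
        refine ih ((lo + hi) / 2 - lo) (by omega) _ _ rfl (by omega) (by omega) hlow ?_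
        intro j hj hjge
        rcases Nat.lt_or_ge j hi with hj2 | hj2
        · rcases Nat.eq_or_lt_of_le hjge with hje | hjlt
          · subst hje; exact hc
          · exact hc.trans_le (List.pairwise_iff_getElem.1 hs _ j hmid hj hjlt)
        · exact hhigh j hj hj2
    · simp only [h, dif_neg, not_false_iff]
      have : lo = hi := by omega
      subst this
      exact ⟨fun j hj hjl => hlow j hj hjl, fun j hj hjg => hhigh j hj hjg⟩

-- the two loop bodies agree on every state: A's min(filter(> p, ts)) is exactly the
-- element of the sorted list at the bisect_right index (or absent, when the index is len)
theorem step_eq (ts : List Int) (L : List Bool) (p : Int) :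
    stepA ts L p = stepB (PySem.List.sorted ts (fun x => x)) L p := by
  have hpair : (PySem.List.sorted ts (fun x => x)).Pairwise (· ≤ ·) :=
    PySem.List.sorted_pairwise ts (fun x => x)
  set s := PySem.List.sorted ts (fun x => x) with hs_def
  obtain ⟨hlow, hhigh⟩ :=
    bisectLoop_spec s p hpair (s.length - 0) 0 s.length rfl le_rfl (Nat.zero_le _)
      (fun j hj hj0 => absurd hj0 (Nat.not_lt_zero j))
      (fun j hj hjge => absurd hj (Nat.not_lt.2 hjge))
  simp only [stepA, stepB]
  generalize hgen : bisectLoop s p 0 s.length = i at hlow hhigh ⊢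
  by_cases hlt : i < s.length
  · -- a terminator to the right exists: A's min(filter(...)) is s[i]
    have hgetD : s.getD i 0 = s[i] := List.getD_eq_getElem s 0 hlt
    have hmemts : s[i] ∈ ts := (PySem.List.mem_sorted ts (fun x => x) false _).1 (List.getElem_mem hlt)
    have hgt : p < s[i] := hhigh i hlt le_rfl
    have hmemf : s[i] ∈ ts.filter (fun x => decide (x > p)) := by
      simp [List.mem_filter, hmemts, hgt]
    have hmin : PySem.List.min? (ts.filter (fun x => decide (x > p))) (fun x => x) = some s[i] := by
      cases hm : PySem.List.min? (ts.filter (fun x => decide (x > p))) (fun x => x) with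
      | none =>
          rw [PySem.List.min?_eq_none_iff] at hm
          rw [hm] at hmemf
          exact absurd hmemf List.not_mem_nil
      | some m =>
          have hm1 : m ∈ ts.filter (fun x => decide (x > p)) := PySem.List.min?_mem hm
          have hmle : m ≤ s[i] := PySem.List.min?_isMin hm _ hmemf
          have hm2 : m ∈ ts ∧ p < m := by simpa [List.mem_filter] using hm1
          have hmems : m ∈ s := (PySem.List.mem_sorted ts (fun x => x) false m).2 hm2.1
          obtain ⟨j, hj, hjm⟩ := List.mem_iff_getElem.1 hmems
          have hij : i ≤ j := by
            by_contra hij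
            have h3 := hlow j hj (Nat.lt_of_not_le hij)
            rw [hjm] at h3
            exact absurd h3 (not_le.2 hm2.2)
          have hsle : s[i] ≤ m := by
            rcases Nat.eq_or_lt_of_le hij with he | hl
            · have : s[i] = s[j] := by simp [he]
              rw [this, hjm]
            · rw [← hjm]
              exact List.pairwise_iff_getElem.1 hpair i j hlt hj hl
          rw [le_antisymm hmle hsle]
    rw [hmin, if_pos hlt, hgetD]
  · -- no terminator > p: A's min(filter(...)) raises, both fill the tail
    have hfe : ts.filter (fun x => decide (x > p)) = [] := by
      rw [List.filter_eq_nil_iff]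
      intro x hx
      have hxs : x ∈ s := (PySem.List.mem_sorted ts (fun x => x) false x).2 hx
      obtain ⟨j, hj, hjx⟩ := List.mem_iff_getElem.1 hxs
      have h4 : s[j] ≤ p := hlow j hj (by omega)
      rw [hjx] at h4
      simp
      omega
    have hmin : PySem.List.min? (ts.filter (fun x => decide (x > p))) (fun x => x) = none := by
      rw [PySem.List.min?_eq_none_iff]; exact hfe
    rw [hmin, if_neg hlt]

-- ===== VERDICT (by name: the statement is the Claim_ definition above) =====
theorem get_possible_activated_sites_spec : Claim_equal_get_possible_activated_sites := by
  intro seq ps ts dir vb _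
  unfold Spec_get_possible_activated_sites
  unfold get_possible_activated_sites get_possible_activated_sites_alt
  have hfold : ∀ (l : List Int) (L : List Bool),
      l.foldl (stepA ts) L = l.foldl (stepB (PySem.List.sorted ts (fun x => x))) L := by
    intro l
    induction l with
    | nil => intro L; rfl
    | cons q l ih => intro L; simp only [List.foldl_cons, step_eq]; exact ih _
  by_cases h1 : dir == "U" <;> by_cases h2 : dir == "D" <;>
    simp [h1, h2, hfold]
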